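-- pv_equiv track=rewrite | github.com/Pedro-Samuel-Rodriguez-Caudillo/PronunciaPA | ipa_core/textref/phonemizer_ref.py | _fallback_phonemize
-- ===== SOURCE A (Python) =====
-- from collections.abc import Iterable
--
-- def _fallback_phonemize(text: str, language: str) -> str:
--     """Fallback muy básico cuando ``phonemizer`` no está disponible."""
--
--     lang = language.lower()
--     if lang in {"es", "es-es", "es-la", "es-mx"}:
--         return " ".join(_fallback_spanish(word) for word in _tokenize(text))
--     if lang in {"en", "en-us", "en-gb"}:
--         return " ".join(_fallback_english(word) for word in _tokenize(text))
--     raise ModuleNotFoundError(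
--         "phonemizer no está instalado y no existe un fallback para el idioma "
--         f"'{language}'. Instale 'phonemizer' y 'espeak-ng'."
--     )
--
-- def _tokenize(text: str) -> Iterable[str]:
--     word = []
--     for char in text.lower():
--         if char.isalpha():
--             word.append(char)
--             continue
--         if word:
--             yield "".join(word)
--             word.clear()
--     if word:
--         yield "".join(word)
--
-- def _fallback_spanish(word: str) -> str:
--     custom = {
--         "hola": "ˈola",
--         "mundo": "ˈmundo",
--         "taco": "ˈtako",
--     }
--     if word in custom:
--         return custom[word]
--     return word
--
-- def _fallback_english(word: str) -> str:
--     custom = {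
--         "taco": "ˈtækoʊ",
--     }
--     if word in custom:
--         return custom[word]
--     return word
-- ===== SOURCE B (Python) =====
-- def _fallback_phonemize(text: str, language: str) -> str:
--     """Fallback muy básico cuando ``phonemizer`` no está disponible."""
--     lang = language.lower()
--     if lang in {"es", "es-es", "es-la", "es-mx"}:
--         table = {"hola": "ˈola", "mundo": "ˈmundo", "taco": "ˈtako"}
--     elif lang in {"en", "en-us", "en-gb"}:
--         table = {"taco": "ˈtækoʊ"}
--     else:
--         raise ModuleNotFoundError(
--             "phonemizer no está instalado y no existe un fallback para el idioma "
--             f"'{language}'. Instale 'phonemizer' y 'espeak-ng'."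
--         )
--     s = text.lower()
--     n = len(s)
--     out = []
--     i = 0
--     while i < n:
--         if s[i].isalpha():
--             j = i + 1
--             while j < n and s[j].isalpha():
--                 j += 1
--             w = s[i:j]
--             out.append(table.get(w, w))
--             i = j
--         else:
--             i += 1
--     return " ".join(out)
-- ===== Notes on version B (the rewrite author's own statement) =====
-- stated objective: alternative
-- what changed: Replaces the char-accumulating generator plus per-word replacement functions with a single index/span scanner over the lowercased text that slices each maximal alpha run and substitutes it through one language-selected dict picked up front.
import Mathlib
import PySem

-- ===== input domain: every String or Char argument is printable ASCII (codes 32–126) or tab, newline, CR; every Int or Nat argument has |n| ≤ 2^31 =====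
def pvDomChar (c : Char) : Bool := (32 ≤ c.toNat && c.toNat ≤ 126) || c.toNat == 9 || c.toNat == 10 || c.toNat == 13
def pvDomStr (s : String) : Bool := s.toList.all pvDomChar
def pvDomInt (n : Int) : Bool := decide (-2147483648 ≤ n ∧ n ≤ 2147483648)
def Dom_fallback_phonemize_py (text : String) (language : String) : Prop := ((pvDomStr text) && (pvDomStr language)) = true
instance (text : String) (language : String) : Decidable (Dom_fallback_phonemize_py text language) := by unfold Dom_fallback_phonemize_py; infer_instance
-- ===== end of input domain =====

-- B replaces A's char-accumulating generator + per-word fallback helpers by one index/span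
-- scan with a single language-selected replacement dict (alternative decomposition, same cost).
-- A raises ModuleNotFoundError for unknown languages; those inputs are excluded by Pre_.

-- ===== PORT A =====
-- _tokenize: generator with a `word` accumulator over text.lower()
def pvTokA : List Char → List Char → List (List Char)
  | [], word => if word.isEmpty then [] else [word]
  | c :: cs, word =>
    if PySem.Chars.isalpha c then pvTokA cs (word ++ [c])
    else if word.isEmpty then pvTokA cs [] else word :: pvTokA cs []

-- _fallback_spanish: membership test in the `custom` dict, else the word itself
def pvSpanishA (w : List Char) : List Char :=
  if w = "hola".toList then "ˈola".toList
  else if w = "mundo".toList then "ˈmundo".toList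
  else if w = "taco".toList then "ˈtako".toList
  else w

-- _fallback_english
def pvEnglishA (w : List Char) : List Char :=
  if w = "taco".toList then "ˈtækoʊ".toList else w

def fallback_phonemize_py (text : String) (language : String) : String :=
  let lang := PySem.Chars.lower language.toList
  if lang ∈ ["es".toList, "es-es".toList, "es-la".toList, "es-mx".toList] then
    String.ofList (PySem.Chars.join [' '] ((pvTokA (PySem.Chars.lower text.toList) []).map pvSpanishA))
  else if lang ∈ ["en".toList, "en-us".toList, "en-gb".toList] then
    String.ofList (PySem.Chars.join [' '] ((pvTokA (PySem.Chars.lower text.toList) []).map pvEnglishA))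
  else ""  -- Python raises ModuleNotFoundError here; excluded by Pre_

-- ===== PORT B =====
-- span scanner: at an alpha char slice the maximal alpha run, replace via the table, resume after it
def pvScanB (table : PySem.Dict (List Char) (List Char)) : List Char → List (List Char)
  | [] => []
  | c :: cs =>
    if PySem.Chars.isalpha c then
      (table.getD (c :: cs.takeWhile PySem.Chars.isalpha) (c :: cs.takeWhile PySem.Chars.isalpha))
        :: pvScanB table (cs.dropWhile PySem.Chars.isalpha)
    else pvScanB table cs
termination_by cs => cs.length
decreasing_by
  · simpa using Nat.lt_succ_of_le (List.length_dropWhile_le _ _)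
  · simp

def pvTableEs : PySem.Dict (List Char) (List Char) :=
  PySem.Dict.ofList [("hola".toList, "ˈola".toList), ("mundo".toList, "ˈmundo".toList),
                     ("taco".toList, "ˈtako".toList)]

def pvTableEn : PySem.Dict (List Char) (List Char) :=
  PySem.Dict.ofList [("taco".toList, "ˈtækoʊ".toList)]

def fallback_phonemize_py_alt (text : String) (language : String) : String :=
  let lang := PySem.Chars.lower language.toList
  if lang ∈ ["es".toList, "es-es".toList, "es-la".toList, "es-mx".toList] then
    String.ofList (PySem.Chars.join [' '] (pvScanB pvTableEs (PySem.Chars.lower text.toList)))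
  else if lang ∈ ["en".toList, "en-us".toList, "en-gb".toList] then
    String.ofList (PySem.Chars.join [' '] (pvScanB pvTableEn (PySem.Chars.lower text.toList)))
  else ""  -- B raises ModuleNotFoundError here too; excluded by Pre_

-- ===== PRECONDITION & SPEC =====
-- Pre_ excludes exactly the unknown languages, on which A (and B) raise ModuleNotFoundError.
def Pre_fallback_phonemize_py (text : String) (language : String) : Prop :=
  PySem.Chars.lower language.toList ∈
    ["es".toList, "es-es".toList, "es-la".toList, "es-mx".toList,
     "en".toList, "en-us".toList, "en-gb".toList]
instance (text : String) (language : String) : Decidable (Pre_fallback_phonemize_py text language) := by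
  unfold Pre_fallback_phonemize_py; infer_instance

def pvWitness_fallback_phonemize_py : String × String := ("Hola, mundo!", "es")

def Spec_fallback_phonemize_py (text : String) (language : String) (out : String) : Prop := out = fallback_phonemize_py_alt text language
instance (text : String) (language : String) (out : String) : Decidable (Spec_fallback_phonemize_py text language out) := by unfold Spec_fallback_phonemize_py; infer_instance

-- ===== CLAIM (what is proved, stated in full; the proofs are below) =====
def Claim_equal_fallback_phonemize_py : Prop := ∀ (text : String) (language : String), Dom_fallback_phonemize_py text language → Pre_fallback_phonemize_py text language → Spec_fallback_phonemize_py text language (fallback_phonemize_py text language)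

-- ===== LEMMAS AND PROOFS =====

-- untabled maximal alpha runs, the common shape both tokenizers reduce to
def pvG : List Char → List (List Char)
  | [] => []
  | c :: cs =>
    if PySem.Chars.isalpha c then
      (c :: cs.takeWhile PySem.Chars.isalpha) :: pvG (cs.dropWhile PySem.Chars.isalpha)
    else pvG cs
termination_by cs => cs.length
decreasing_by
  · simpa using Nat.lt_succ_of_le (List.length_dropWhile_le _ _)
  · simp

lemma pvG_span (cs : List Char) :
    (if cs.takeWhile PySem.Chars.isalpha = [] then pvG (cs.dropWhile PySem.Chars.isalpha)
     else cs.takeWhile PySem.Chars.isalpha :: pvG (cs.dropWhile PySem.Chars.isalpha)) = pvG cs := by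
  cases cs with
  | nil => simp [pvG]
  | cons c cs =>
    by_cases h : PySem.Chars.isalpha c = true <;>
      simp [pvG, h, List.takeWhile, List.dropWhile]

lemma pvTokA_span (cs : List Char) : ∀ word : List Char,
    pvTokA cs word =
      (if word ++ cs.takeWhile PySem.Chars.isalpha = [] then
        pvG (cs.dropWhile PySem.Chars.isalpha)
       else (word ++ cs.takeWhile PySem.Chars.isalpha) :: pvG (cs.dropWhile PySem.Chars.isalpha)) := by
  induction cs with
  | nil => intro word; cases word <;> simp [pvTokA, List.isEmpty, pvG]
  | cons c cs ih =>
    intro word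
    by_cases h : PySem.Chars.isalpha c = true
    · rw [pvTokA, if_pos h, ih (word ++ [c])]
      simp [List.takeWhile, List.dropWhile, h]
    · have hb : PySem.Chars.isalpha c = false := by simpa using h
      have htok : pvTokA cs [] = pvG cs := by
        rw [ih []]; simpa using pvG_span cs
      rw [pvTokA, if_neg h]
      cases word with
      | nil => simp [List.takeWhile, List.dropWhile, hb, pvG, htok]
      | cons w ws => simp [List.takeWhile, List.dropWhile, hb, pvG, htok]

lemma pvTokA_eq_pvG (cs : List Char) : pvTokA cs [] = pvG cs := by
  rw [pvTokA_span cs []]; simpa using pvG_span cs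

lemma pvScanB_eq_map (table : PySem.Dict (List Char) (List Char)) (cs : List Char) :
    pvScanB table cs = (pvG cs).map (fun w => table.getD w w) := by
  induction cs using pvG.induct with
  | case1 => simp [pvScanB, pvG]
  | case2 c cs h ih => rw [pvScanB, pvG]; simp [h, ih]
  | case3 c cs h ih => rw [pvScanB, pvG]; simp [h, ih]

lemma pvTableEs_getD (w : List Char) : pvTableEs.getD w w = pvSpanishA w := by
  have h : pvTableEs = PySem.Dict.mk [("hola".toList, "\u02c8ola".toList), ("mundo".toList, "\u02c8mundo".toList), ("taco".toList, "\u02c8tako".toList)] := by decide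
  rw [h]
  by_cases h1 : w = "hola".toList
  · subst h1; decide
  by_cases h2 : w = "mundo".toList
  · subst h2; decide
  by_cases h3 : w = "taco".toList
  · subst h3; decide
  have m1 : w ≠ ['h','o','l','a'] := by simpa using h1
  have m2 : w ≠ ['m','u','n','d','o'] := by simpa using h2
  have m3 : w ≠ ['t','a','c','o'] := by simpa using h3
  have n1 : ((['h','o','l','a'] : List Char) == w) = false := beq_eq_false_iff_ne.mpr (Ne.symm m1)
  have n2 : ((['m','u','n','d','o'] : List Char) == w) = false := beq_eq_false_iff_ne.mpr (Ne.symm m2)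
  have n3 : ((['t','a','c','o'] : List Char) == w) = false := beq_eq_false_iff_ne.mpr (Ne.symm m3)
  simp [PySem.Dict.getD, PySem.Dict.get?, List.find?, pvSpanishA, n1, n2, n3, m1, m2, m3]

lemma pvTableEn_getD (w : List Char) : pvTableEn.getD w w = pvEnglishA w := by
  have h : pvTableEn = PySem.Dict.mk [("taco".toList, "\u02c8t\u00e6ko\u028a".toList)] := by decide
  rw [h]
  by_cases h1 : w = "taco".toList
  · subst h1; decide
  have m1 : w ≠ ['t','a','c','o'] := by simpa using h1
  have n1 : ((['t','a','c','o'] : List Char) == w) = false := beq_eq_false_iff_ne.mpr (Ne.symm m1)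
  simp [PySem.Dict.getD, PySem.Dict.get?, List.find?, pvEnglishA, n1, m1]

-- ===== VERDICT (by name: the statement is the Claim_ definition above) =====
theorem fallback_phonemize_py_spec : Claim_equal_fallback_phonemize_py := by
  intro text language _ _
  show fallback_phonemize_py text language = fallback_phonemize_py_alt text language
  unfold fallback_phonemize_py fallback_phonemize_py_alt
  dsimp only
  split_ifs with h1 h2 <;> try rfl
  · rw [pvScanB_eq_map, ← pvTokA_eq_pvG]
    congr 2
    exact (List.map_congr_left fun w _ => (pvTableEs_getD w)).symm
  · rw [pvScanB_eq_map, ← pvTokA_eq_pvG]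
    congr 2
    exact (List.map_congr_left fun w _ => (pvTableEn_getD w)).symm
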